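-- pv_equiv track=rewrite | github.com/poemyaya/ccks2018task2 | rules2.py | reValueList
-- ===== SOURCE A (Python) =====
-- def reValueList(words,datadicts):
--     reLists = []
--     for char_i in range(len(words)):
--         char = words[char_i]
--         if char in datadicts.keys():
--             values = datadicts[char]
--             for char_j in range(char_i, len(words), 1):
--                 charlist = [words[i] for i in range(char_i, char_j + 1, 1)]
--                 name = ''.join(charlist)
--                 if name in values:
--                     reLists.append(name)
--     reLists = list(set(reLists))
--     return reLists
-- ===== SOURCE B (Python) =====
-- def reValueList(words, datadicts):
--     found = []
--     for i, w in enumerate(words):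
--         values = datadicts.get(w)
--         if values is None:
--             continue
--         for name in values:
--             s = w
--             for nxt in words[i + 1:]:
--                 if len(s) >= len(name):
--                     break
--                 s += nxt
--             if s == name:
--                 found.append(name)
--     return sorted(set(found))
-- ===== Notes on version B (the rewrite author's own statement) =====
-- stated objective: faster
-- what changed: Instead of enumerating every window words[i..j], joining it and scanning the value list for it, B iterates over the dictionary's candidate names at each key position and verifies each candidate directly by extending a running string only until it reaches the candidate's length; final deduplication returns sorted(set(...)) (outputs are compared as sets).
import Mathlib
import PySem

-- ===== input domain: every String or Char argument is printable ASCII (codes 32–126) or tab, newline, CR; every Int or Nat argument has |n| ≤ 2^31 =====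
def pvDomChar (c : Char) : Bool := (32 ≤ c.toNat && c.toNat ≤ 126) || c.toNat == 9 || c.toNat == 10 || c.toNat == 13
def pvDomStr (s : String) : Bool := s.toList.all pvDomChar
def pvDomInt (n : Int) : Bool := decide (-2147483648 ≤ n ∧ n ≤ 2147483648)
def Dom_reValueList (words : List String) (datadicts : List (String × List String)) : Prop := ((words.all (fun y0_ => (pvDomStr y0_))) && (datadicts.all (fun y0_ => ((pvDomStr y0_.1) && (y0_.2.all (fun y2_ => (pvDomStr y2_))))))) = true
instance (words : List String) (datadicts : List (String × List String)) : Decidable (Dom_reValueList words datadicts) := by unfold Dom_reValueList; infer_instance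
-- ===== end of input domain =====

-- B verifies each dictionary candidate directly at its start position instead of enumerating and
-- joining every window of `words` (objective: faster). Both Pythons end by deduplicating into a
-- set whose iteration order is hash-dependent and not modellable; since outputs are compared as
-- sets, both ports render that final step canonically sorted.

-- ===== PORT A =====
def reValueList (words : List String) (datadicts : List (String × List String)) : List String :=
  let reLists : List String :=
    (PySem.List.pyRange 0 (PySem.List.len words) 1).foldl (fun acc ci =>
      let char := PySem.List.pyGetD words ci ""
      if PySem.Dict.contains (PySem.Dict.mk datadicts) char then
        let values := PySem.Dict.getD (PySem.Dict.mk datadicts) char []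
        (PySem.List.pyRange ci (PySem.List.len words) 1).foldl (fun acc2 cj =>
          let charlist := (PySem.List.pyRange ci (cj + 1) 1).map (fun k => PySem.List.pyGetD words k "")
          let name := PySem.Str.join "" charlist
          if values.contains name then acc2 ++ [name] else acc2) acc
      else acc) []
  -- list(set(reLists)): the set's iteration order is hash-dependent (not modelled);
  -- rendered canonically sorted — outputs of this function are compared as sets
  PySem.List.sorted (PySem.Set.ofList reLists) (fun x => x) false

-- ===== PORT B =====
-- the while-loop of Source B: extend s with the next words until it reaches the target's length
def pvGrow (rest : List String) (target : List Char) (s : List Char) : List Char :=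
  match rest with
  | [] => s
  | w :: rs => if s.length < target.length then pvGrow rs target (s ++ w.toList) else s

def reValueList_alt (words : List String) (datadicts : List (String × List String)) : List String :=
  let found : List String :=
    (words.zipIdx).foldl (fun acc wi =>
      match PySem.Dict.get? (PySem.Dict.mk datadicts) wi.1 with
      | none => acc
      | some values =>
        values.foldl (fun acc2 name =>
          if pvGrow (PySem.List.slice words (some ((wi.2 : Int) + 1)) none) name.toList wi.1.toList = name.toList
          then acc2 ++ [name] else acc2) acc) []
  -- sorted(set(found))
  PySem.List.sorted (PySem.Set.ofList found) (fun x => x) false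

-- ===== PRECONDITION & SPEC =====
def Spec_reValueList (words : List String) (datadicts : List (String × List String)) (out : List String) : Prop := out = reValueList_alt words datadicts
instance (words : List String) (datadicts : List (String × List String)) (out : List String) : Decidable (Spec_reValueList words datadicts out) := by unfold Spec_reValueList; infer_instance

-- ===== CLAIM (what is proved, stated in full; the proofs are below) =====
def Claim_equal_reValueList : Prop := ∀ (words : List String) (datadicts : List (String × List String)), Dom_reValueList words datadicts → Spec_reValueList words datadicts (reValueList words datadicts)

-- ===== LEMMAS AND PROOFS =====

-- ''.join(parts) is the concatenation of the parts
lemma pvJoinNil (parts : List (List Char)) : PySem.Chars.join [] parts = parts.flatten := by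
  induction parts with
  | nil => simp [PySem.Chars.join, List.intercalate]
  | cons a t ih =>
    cases t with
    | nil => simp [PySem.Chars.join, List.intercalate]
    | cons b r => rw [PySem.Chars.join_cons_cons]; simp_all

-- the grow loop hits its target iff the target is the join of some prefix of the remaining words
lemma pvGrow_iff (rest : List String) (t s : List Char) :
    pvGrow rest t s = t ↔ ∃ k, k ≤ rest.length ∧ s ++ ((rest.take k).map String.toList).flatten = t := by
  induction rest generalizing s with
  | nil =>
    simp only [pvGrow, List.length_nil, Nat.le_zero]
    constructor
    · rintro rfl; exact ⟨0, rfl, by simp⟩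
    · rintro ⟨k, rfl, h⟩; simpa using h
  | cons w rs ih =>
    simp only [pvGrow]
    by_cases h : s.length < t.length
    · rw [if_pos h, ih]
      constructor
      · rintro ⟨k, hk, heq⟩
        exact ⟨k + 1, by simpa using hk, by simpa [List.append_assoc] using heq⟩
      · rintro ⟨k, hk, heq⟩
        cases k with
        | zero =>
          exfalso
          simp at heq
          rw [heq] at h
          omega
        | succ k' => exact ⟨k', by simpa using hk, by simpa [List.append_assoc] using heq⟩
    · rw [if_neg h]
      constructor
      · rintro rfl; exact ⟨0, Nat.zero_le _, by simp⟩
      · rintro ⟨k, hk, heq⟩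
        have hl := congrArg List.length heq
        simp only [List.length_append] at hl
        have h0 : (((w :: rs).take k).map String.toList).flatten.length = 0 := by omega
        rw [List.length_eq_zero_iff] at h0
        rw [h0] at heq
        simpa using heq

-- A's window [words[i], …, words[j]] is a drop/take slice
lemma pvWindow (words : List String) (i j : Nat) (hij : i ≤ j) (hj : j < words.length) :
    (PySem.List.pyRange (i : Int) ((j : Int) + 1)).map (fun k => PySem.List.pyGetD words k "") =
      (words.drop i).take (j + 1 - i) := by
  rw [PySem.List.pyRange_one]
  have hcnt : ((j : Int) + 1 - i).toNat = j + 1 - i := by omega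
  rw [hcnt, List.map_map]
  apply List.ext_getElem
  · simp; omega
  · intro m h1 h2
    simp only [List.getElem_map, List.getElem_range, Function.comp_apply]
    have : ((i : Int) + (m : Int)) = ((i + m : Nat) : Int) := by push_cast; ring
    rw [this, PySem.List.pyGetD_natCast]
    have hm : m < j + 1 - i := by simpa using h1
    rw [List.getElem_take, List.getElem_drop]
    rw [List.getD_eq_getElem?_getD, List.getElem?_eq_getElem (by omega)]
    rfl

-- core: some window starting at i joins to x  ↔  B's grow loop at i reproduces x
lemma pvPos_iff (words : List String) (i : Nat) (hi : i < words.length) (x : String) :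
    (∃ j : Nat, i ≤ j ∧ j < words.length ∧
        PySem.Str.join "" ((PySem.List.pyRange (i : Int) ((j : Int) + 1)).map (fun k => PySem.List.pyGetD words k "")) = x)
      ↔ pvGrow (words.drop (i + 1)) x.toList (words[i]'hi).toList = x.toList := by
  rw [pvGrow_iff]
  have hd : words.drop i = (words[i]'hi) :: words.drop (i + 1) := List.drop_eq_getElem_cons hi
  constructor
  · rintro ⟨j, hij, hj, hjoin⟩
    refine ⟨j - i, by rw [List.length_drop]; omega, ?_⟩
    have h1 := congrArg String.toList hjoin
    rw [PySem.Str.toList_join, pvWindow words i j hij hj] at h1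
    simp only [String.toList_empty] at h1
    rw [pvJoinNil] at h1
    rw [hd] at h1
    have ht : (((words[i]'hi) :: words.drop (i + 1)).take (j + 1 - i)) =
        (words[i]'hi) :: (words.drop (i + 1)).take (j - i) := by
      have hji : j + 1 - i = (j - i) + 1 := by omega
      rw [hji, List.take_succ_cons]
    rw [ht] at h1
    simpa using h1
  · rintro ⟨k, hk, heq⟩
    rw [List.length_drop] at hk
    refine ⟨i + k, by omega, by omega, ?_⟩
    apply String.toList_inj.mp
    rw [PySem.Str.toList_join, pvWindow words i (i + k) (by omega) (by omega)]
    simp only [String.toList_empty]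
    rw [pvJoinNil, hd]
    have ht : (((words[i]'hi) :: words.drop (i + 1)).take (i + k + 1 - i)) =
        (words[i]'hi) :: (words.drop (i + 1)).take k := by
      have : i + k + 1 - i = k + 1 := by omega
      rw [this, List.take_succ_cons]
    rw [ht]
    simpa using heq

-- membership in A's raw (pre-dedup) list
lemma pvMemA (words : List String) (datadicts : List (String × List String)) (x : String) :
    x ∈ (PySem.List.pyRange 0 (PySem.List.len words) 1).foldl (fun acc ci =>
          if PySem.Dict.contains (PySem.Dict.mk datadicts) (PySem.List.pyGetD words ci "") then
            (PySem.List.pyRange ci (PySem.List.len words) 1).foldl (fun acc2 cj =>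
              if (PySem.Dict.getD (PySem.Dict.mk datadicts) (PySem.List.pyGetD words ci "") []).contains
                   (PySem.Str.join "" ((PySem.List.pyRange ci (cj + 1) 1).map (fun k => PySem.List.pyGetD words k ""))) then
                acc2 ++ [PySem.Str.join "" ((PySem.List.pyRange ci (cj + 1) 1).map (fun k => PySem.List.pyGetD words k ""))]
              else acc2) acc
          else acc) []
      ↔ ∃ i : Nat, ∃ hi : i < words.length,
          ∃ values, PySem.Dict.get? (PySem.Dict.mk datadicts) (words[i]'hi) = some values ∧ values.contains x ∧
          ∃ j : Nat, i ≤ j ∧ j < words.length ∧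
            PySem.Str.join "" ((PySem.List.pyRange (i : Int) ((j : Int) + 1)).map (fun k => PySem.List.pyGetD words k "")) = x := by
  rw [PySem.List.foldl_congr_mem' _ _
      (fun acc ci => acc ++
        (if PySem.Dict.contains (PySem.Dict.mk datadicts) (PySem.List.pyGetD words ci "") then
          ((PySem.List.pyRange ci (PySem.List.len words) 1).filter (fun cj =>
              (PySem.Dict.getD (PySem.Dict.mk datadicts) (PySem.List.pyGetD words ci "") []).contains
                (PySem.Str.join "" ((PySem.List.pyRange ci (cj + 1) 1).map (fun k => PySem.List.pyGetD words k ""))))).map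
            (fun cj => PySem.Str.join "" ((PySem.List.pyRange ci (cj + 1) 1).map (fun k => PySem.List.pyGetD words k "")))
        else [])) _
      (by
        intro ci _ acc
        dsimp only
        by_cases hc : PySem.Dict.contains (PySem.Dict.mk datadicts) (PySem.List.pyGetD words ci "") = true
        · rw [if_pos hc, if_pos hc]
          exact PySem.List.foldl_append_if _ _ _ acc
        · rw [if_neg hc, if_neg hc, List.append_nil])]
  rw [PySem.List.foldl_append_eq_flatMap, List.nil_append, List.mem_flatMap]
  constructor
  · rintro ⟨ci, hci, hx⟩
    rw [PySem.List.len_eq, PySem.List.mem_pyRange_one] at hci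
    obtain ⟨h0, hlt⟩ := hci
    have hii : ci = ((ci.toNat : Nat) : Int) := by omega
    set i := ci.toNat with hidef
    have hi : i < words.length := by omega
    rw [hii, PySem.List.pyGetD_natCast, List.getD_eq_getElem _ _ hi] at hx
    by_cases hc : PySem.Dict.contains (PySem.Dict.mk datadicts) (words[i]'hi) = true
    · rw [if_pos hc] at hx
      obtain ⟨cj, hcjmem, hcjx⟩ := List.mem_map.mp hx
      obtain ⟨hcjr, hcjp⟩ := List.mem_filter.mp hcjmem
      rw [PySem.List.len_eq, PySem.List.mem_pyRange_one] at hcjr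
      have hjj : cj = ((cj.toNat : Nat) : Int) := by omega
      set j := cj.toNat with hjdef
      have hj : j < words.length := by omega
      rw [PySem.Dict.contains_eq_isSome_get?] at hc
      obtain ⟨values, hv⟩ := Option.isSome_iff_exists.mp hc
      refine ⟨i, hi, values, hv, ?_, j, by omega, hj, ?_⟩
      · have := hcjp
        rw [PySem.Dict.getD_eq_get?_getD, hv] at this
        simpa [hcjx] using this
      · rw [← hcjx, hjj]
    · rw [if_neg hc] at hx
      exact absurd hx (List.not_mem_nil)
  · rintro ⟨i, hi, values, hv, hcx, j, hij, hj, hjoin⟩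
    refine ⟨(i : Int), ?_, ?_⟩
    · rw [PySem.List.len_eq, PySem.List.mem_pyRange_one]
      exact ⟨Int.natCast_nonneg i, by exact_mod_cast hi⟩
    · rw [PySem.List.pyGetD_natCast, List.getD_eq_getElem _ _ hi]
      have hc : PySem.Dict.contains (PySem.Dict.mk datadicts) (words[i]'hi) = true := by
        rw [PySem.Dict.contains_eq_isSome_get?, hv]; rfl
      rw [if_pos hc]
      refine List.mem_map.mpr ⟨(j : Int), List.mem_filter.mpr ⟨?_, ?_⟩, hjoin⟩
      · rw [PySem.List.len_eq, PySem.List.mem_pyRange_one]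
        exact ⟨by exact_mod_cast hij, by exact_mod_cast hj⟩
      · rw [PySem.Dict.getD_eq_get?_getD, hv, hjoin]
        exact hcx

-- membership in B's raw (pre-dedup) list
lemma pvMemB (words : List String) (datadicts : List (String × List String)) (x : String) :
    x ∈ (words.zipIdx).foldl (fun acc wi =>
          match PySem.Dict.get? (PySem.Dict.mk datadicts) wi.1 with
          | none => acc
          | some values =>
            values.foldl (fun acc2 name =>
              if pvGrow (PySem.List.slice words (some ((wi.2 : Int) + 1)) none) name.toList wi.1.toList = name.toList
              then acc2 ++ [name] else acc2) acc) []
      ↔ ∃ i : Nat, ∃ hi : i < words.length,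
          ∃ values, PySem.Dict.get? (PySem.Dict.mk datadicts) (words[i]'hi) = some values ∧ values.contains x ∧
            pvGrow (words.drop (i + 1)) x.toList ((words[i]'hi).toList) = x.toList := by
  rw [PySem.List.foldl_congr_mem' _ _
      (fun acc wi => acc ++
        (match PySem.Dict.get? (PySem.Dict.mk datadicts) wi.1 with
         | none => []
         | some values =>
            values.filter (fun name =>
              decide (pvGrow (PySem.List.slice words (some ((wi.2 : Int) + 1)) none) name.toList wi.1.toList = name.toList)))) _
      (by
        intro wi _ acc
        dsimp only
        cases hgd : PySem.Dict.get? (PySem.Dict.mk datadicts) wi.1 with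
        | none => simp
        | some values => exact PySem.List.foldl_append_ite_eq_filter _ values acc)]
  rw [PySem.List.foldl_append_eq_flatMap, List.nil_append, List.mem_flatMap]
  constructor
  · rintro ⟨wi, hwi, hx⟩
    obtain ⟨hk, hlt, hval⟩ := List.mem_zipIdx hwi
    set i := wi.2 with hidef
    have hi : i < words.length := by omega
    cases hgd : PySem.Dict.get? (PySem.Dict.mk datadicts) wi.1 with
    | none => rw [hgd] at hx; exact absurd hx (List.not_mem_nil)
    | some values =>
      rw [hgd] at hx
      obtain ⟨hxv, hxp⟩ := List.mem_filter.mp hx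
      rw [decide_eq_true_iff] at hxp
      have hw : wi.1 = words[i]'hi := by simpa using hval
      have hslice : PySem.List.slice words (some ((i : Int) + 1)) none = words.drop (i + 1) := by
        have : ((i : Int) + 1) = ((i + 1 : Nat) : Int) := by push_cast; ring
        rw [this, PySem.List.slice_from_natCast]
      refine ⟨i, hi, values, by rw [← hw]; exact hgd, List.contains_iff_mem.mpr hxv, ?_⟩
      rw [← hslice, ← hw]
      exact hxp
  · rintro ⟨i, hi, values, hv, hcx, hgrow⟩
    refine ⟨(words[i]'hi, i), by simp [List.mem_zipIdx_iff_getElem?], ?_⟩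
    rw [hv]
    refine List.mem_filter.mpr ⟨List.contains_iff_mem.mp hcx, ?_⟩
    rw [decide_eq_true_iff]
    have hslice : PySem.List.slice words (some ((i : Int) + 1)) none = words.drop (i + 1) := by
      have : ((i : Int) + 1) = ((i + 1 : Nat) : Int) := by push_cast; ring
      rw [this, PySem.List.slice_from_natCast]
    rw [hslice]
    exact hgrow

-- ===== VERDICT (by name: the statement is the Claim_ definition above) =====
theorem reValueList_spec : Claim_equal_reValueList := by
  intro words datadicts _
  unfold Spec_reValueList reValueList reValueList_alt
  apply PySem.List.sorted_eq_sorted_of_perm _ _ _ Function.injective_id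
  rw [List.perm_ext_iff_of_nodup (PySem.Set.nodup_ofList _) (PySem.Set.nodup_ofList _)]
  intro x
  rw [PySem.Set.mem_ofList, PySem.Set.mem_ofList, pvMemA, pvMemB]
  constructor
  · rintro ⟨i, hi, values, hv, hx, hwin⟩
    exact ⟨i, hi, values, hv, hx, (pvPos_iff words i hi x).mp hwin⟩
  · rintro ⟨i, hi, values, hv, hx, hgrow⟩
    exact ⟨i, hi, values, hv, hx, (pvPos_iff words i hi x).mpr hgrow⟩
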